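-- pv_equiv track=rewrite | github.com/danilobsilv/engenhariaDeComputacao | Sinais_e_Sistemas/convolucao.py | convolucao_linear
-- ===== SOURCE A (Python) =====
-- def convolucao_linear(vetor_XN, vetor_HN):
--     result_size = len(vetor_XN) + len(vetor_HN) - 1
--     result = []
--
--     for i in range(result_size):
--         conv_sum = 0
--         for j in range(len(vetor_HN)):
--             if i - j >= 0 and i - j < len(vetor_XN):
--                 conv_sum += vetor_XN[i - j] * vetor_HN[j]
--         result.append(conv_sum)
--
--     return result
-- ===== SOURCE B (Python) =====
-- def convolucao_linear(vetor_XN, vetor_HN):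
--     # scatter/accumulate convolution: preallocate the output, then add each
--     # product XN[idx]*HN[j] into result[idx+j]; no per-output bounds checks.
--     result = [0] * (len(vetor_XN) + len(vetor_HN) - 1)
--     for j in range(len(vetor_HN)):
--         h = vetor_HN[j]
--         for idx in range(len(vetor_XN)):
--             result[idx + j] += vetor_XN[idx] * h
--     return result
-- ===== Notes on version B (the rewrite author's own statement) =====
-- stated objective: faster
-- what changed: Replaced the per-output gather with bounds checks inside the inner loop by a scatter/accumulate convolution into a preallocated output, removing all per-term range tests.
import Mathlib
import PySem

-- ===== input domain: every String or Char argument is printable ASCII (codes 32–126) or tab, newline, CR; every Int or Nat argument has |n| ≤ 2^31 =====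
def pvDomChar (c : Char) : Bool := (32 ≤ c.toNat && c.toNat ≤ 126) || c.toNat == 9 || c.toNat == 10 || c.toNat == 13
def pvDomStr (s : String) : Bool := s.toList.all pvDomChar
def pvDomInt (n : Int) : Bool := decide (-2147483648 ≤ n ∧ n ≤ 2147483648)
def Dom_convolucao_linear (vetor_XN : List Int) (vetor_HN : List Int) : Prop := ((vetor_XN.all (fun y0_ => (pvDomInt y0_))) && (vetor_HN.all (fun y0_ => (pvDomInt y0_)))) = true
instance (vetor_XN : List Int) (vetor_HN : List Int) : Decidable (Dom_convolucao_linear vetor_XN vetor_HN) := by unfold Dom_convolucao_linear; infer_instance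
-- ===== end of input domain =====

-- B replaces A's per-output gather (with a bounds test on every term) by a
-- scatter/accumulate convolution into a preallocated zero list (constant-factor objective).

-- ===== PORT A =====
-- gather: for each output index i, sum X[i-j]*H[j] over the j's that are in range
def convolucao_linear (vetor_XN : List Int) (vetor_HN : List Int) : List Int :=
  (List.range (vetor_XN.length + vetor_HN.length - 1)).foldl
    (fun result i =>
      result ++ [(List.range vetor_HN.length).foldl
        (fun conv_sum j =>
          if j ≤ i ∧ i - j < vetor_XN.length then
            conv_sum + vetor_XN.getD (i - j) 0 * vetor_HN.getD j 0
          else conv_sum) 0])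
    []

-- ===== PORT B =====
-- scatter: result[idx+j] += X[idx]*H[j], j outer, over a preallocated zero list
def convolucao_linear_alt (vetor_XN : List Int) (vetor_HN : List Int) : List Int :=
  (List.range vetor_HN.length).foldl
    (fun result j =>
      (List.range vetor_XN.length).foldl
        (fun res idx =>
          res.set (idx + j) (res.getD (idx + j) 0 + vetor_XN.getD idx 0 * vetor_HN.getD j 0))
        result)
    (List.replicate (vetor_XN.length + vetor_HN.length - 1) 0)

-- ===== PRECONDITION & SPEC =====
def Spec_convolucao_linear (vetor_XN : List Int) (vetor_HN : List Int) (out : List Int) : Prop := out = convolucao_linear_alt vetor_XN vetor_HN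
instance (vetor_XN : List Int) (vetor_HN : List Int) (out : List Int) : Decidable (Spec_convolucao_linear vetor_XN vetor_HN out) := by unfold Spec_convolucao_linear; infer_instance

-- ===== CLAIM (what is proved, stated in full; the proofs are below) =====
def Claim_equal_convolucao_linear : Prop := ∀ (vetor_XN : List Int) (vetor_HN : List Int), Dom_convolucao_linear vetor_XN vetor_HN → Spec_convolucao_linear vetor_XN vetor_HN (convolucao_linear vetor_XN vetor_HN)

-- ===== LEMMAS AND PROOFS =====

-- the single term X[k-j]*H[j] when in range, else 0
def convTerm (X H : List Int) (k j : Nat) : Int :=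
  if j ≤ k ∧ k - j < X.length then X.getD (k - j) 0 * H.getD j 0 else 0

-- partial gather sum over the first m taps
def convPartial (X H : List Int) (m k : Nat) : Int :=
  ((List.range m).map (convTerm X H k)).sum

-- a guarded accumulating foldl over range is the sum of guarded terms
theorem foldl_if_add_range (n : Nat) (P : Nat → Prop) [DecidablePred P]
    (f : Nat → Int) (c : Int) :
    (List.range n).foldl (fun s j => if P j then s + f j else s) c
      = c + ((List.range n).map (fun j => if P j then f j else 0)).sum := by
  induction n generalizing c with
  | zero => simp
  | succ n ih =>
      rw [List.range_succ, List.foldl_append, List.map_append]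
      simp only [List.foldl_cons, List.foldl_nil, List.sum_append, ih]
      by_cases h : P n <;> simp [h, add_assoc]

-- A is the map of full gather sums
theorem convA_eq_map (X H : List Int) :
    convolucao_linear X H
      = (List.range (X.length + H.length - 1)).map (convPartial X H H.length) := by
  unfold convolucao_linear
  rw [PySem.List.foldl_append_singleton_eq_map]
  refine List.map_congr_left (fun i _ => ?_)
  rw [foldl_if_add_range, zero_add]
  unfold convPartial
  refine congrArg List.sum (List.map_congr_left fun j _ => ?_)
  simp [convTerm, List.getD]

-- getD of a set at the written (in-range) index
theorem set_getD_self (l : List Int) (i : Nat) (a : Int) (h : i < l.length) :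
    (l.set i a).getD i 0 = a := by
  simp [List.getD, h]

-- getD of a set at any other index
theorem set_getD_ne (l : List Int) (i k : Nat) (a : Int) (h : k ≠ i) :
    (l.set i a).getD k 0 = l.getD k 0 := by
  simp [List.getD, Ne.symm h]

-- the inner scatter pass keeps the length
theorem inner_length (X : List Int) (v : Int) (j : Nat) :
    ∀ (n : Nat) (r : List Int),
      ((List.range n).foldl
        (fun res idx => res.set (idx + j) (res.getD (idx + j) 0 + X.getD idx 0 * v)) r).length
      = r.length := by
  intro n
  induction n with
  | zero => simp
  | succ n ih =>
      intro r
      rw [List.range_succ, List.foldl_append]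
      simp only [List.foldl_cons, List.foldl_nil]
      rw [List.length_set, ih]

-- elementwise effect of the inner scatter pass
theorem inner_getD (X : List Int) (v : Int) (j : Nat) :
    ∀ (n : Nat) (r : List Int) (k : Nat),
      ((List.range n).foldl
        (fun res idx => res.set (idx + j) (res.getD (idx + j) 0 + X.getD idx 0 * v)) r).getD k 0
      = r.getD k 0 + (if j ≤ k ∧ k - j < n ∧ k < r.length then X.getD (k - j) 0 * v else 0) := by
  intro n
  induction n with
  | zero => simp
  | succ n ih =>
      intro r k
      rw [List.range_succ, List.foldl_append]
      simp only [List.foldl_cons, List.foldl_nil]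
      have hlen : ((List.range n).foldl
          (fun res idx => res.set (idx + j) (res.getD (idx + j) 0 + X.getD idx 0 * v)) r).length
          = r.length := inner_length X v j n r
      by_cases hk : k = n + j
      · subst hk
        by_cases hin : n + j < r.length
        · rw [set_getD_self _ _ _ (by rw [hlen]; exact hin), ih]
          have hfalse : ¬ (j ≤ n + j ∧ n + j - j < n ∧ n + j < r.length) := by omega
          have htrue : j ≤ n + j ∧ n + j - j < n + 1 ∧ n + j < r.length := by omega
          rw [if_neg hfalse, if_pos htrue, add_zero]
          have : n + j - j = n := by omega
          rw [this]
        · have h1 : r.length ≤ n + j := by omega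
          rw [List.getD_eq_default _ _ (by rw [List.length_set, hlen]; exact h1)]
          rw [List.getD_eq_default _ _ h1]
          rw [if_neg (by omega)]; simp
      · rw [set_getD_ne _ _ _ _ hk, ih]
        congr 1
        by_cases h1 : j ≤ k ∧ k - j < n ∧ k < r.length
        · rw [if_pos h1, if_pos (by omega)]
        · rw [if_neg h1, if_neg (by omega)]

-- the outer fold over the first m taps produces the partial gather sums
theorem outer_eq (X H : List Int) :
    ∀ (m : Nat), m ≤ H.length →
      (List.range m).foldl
        (fun result jj =>
          (List.range X.length).foldl
            (fun res idx => res.set (idx + jj) (res.getD (idx + jj) 0 + X.getD idx 0 * H.getD jj 0))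
            result)
        (List.replicate (X.length + H.length - 1) 0)
      = (List.range (X.length + H.length - 1)).map (convPartial X H m) := by
  intro m
  induction m with
  | zero =>
      intro _
      have hc : convPartial X H 0 = fun _ => (0 : Int) := by
        funext k; simp [convPartial]
      simp only [List.range_zero, List.foldl_nil, hc, List.map_const', List.length_range]
  | succ m ih =>
      intro hm
      rw [List.range_succ, List.foldl_append]
      simp only [List.foldl_cons, List.foldl_nil]
      rw [ih (by omega)]
      have hlenmap : ∀ mm : Nat, ((List.range (X.length + H.length - 1)).map (convPartial X H mm)).length = X.length + H.length - 1 := by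
        intro mm; simp
      apply List.ext_getElem
      · rw [inner_length]; simp
      · intro k h1 h2
        have hk : k < X.length + H.length - 1 := by simpa using h2
        have hmap : ∀ mm : Nat, ((List.range (X.length + H.length - 1)).map (convPartial X H mm)).getD k 0 = convPartial X H mm k := by
          intro mm
          rw [List.getD_eq_getElem _ 0 (by simpa using hk)]
          simp
        rw [← List.getD_eq_getElem _ 0 h1, ← List.getD_eq_getElem _ 0 h2]
        rw [inner_getD, hmap, hmap, hlenmap]
        unfold convPartial
        rw [List.range_succ, List.map_append, List.sum_append]
        simp only [List.map_cons, List.map_nil, List.sum_cons, List.sum_nil, add_zero]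
        congr 1
        unfold convTerm
        by_cases h3 : m ≤ k ∧ k - m < X.length
        · rw [if_pos ⟨h3.1, h3.2, hk⟩, if_pos h3]
        · rw [if_neg (by tauto), if_neg h3]

-- ===== VERDICT (by name: the statement is the Claim_ definition above) =====
theorem convolucao_linear_spec : Claim_equal_convolucao_linear := by
  intro X H _
  show convolucao_linear X H = convolucao_linear_alt X H
  rw [convA_eq_map]
  unfold convolucao_linear_alt
  rw [outer_eq X H H.length le_rfl]
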